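-- pv_equiv track=rewrite | github.com/skochv04/algorithms-and-data-structures | lab7/Cw 2.py | DFS_first
-- ===== SOURCE A (Python) =====
-- def DFS_first (G):
--     #reprezentacja macierzowa
--     n = len(G)
--     visited = [False for _ in range(n)]
--
--     def DFS_visit(G, u):
--         visited[u] = True
--         for v in range(n):
--             if G[u][v] and not visited[v]:
--                 DFS_visit(G, v)
--     last = 0
--     for ver in range(n):
--         if not visited[ver]:
--             last = ver
--             DFS_visit(G, ver)
--     return last
-- ===== SOURCE B (Python) =====
-- def DFS_first(G):
--     # Round-based reachability closure instead of DFS: maintain the set of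
--     # vertices reachable from the already-processed prefix; when a vertex is
--     # not yet in that closure it starts a new tree (becomes `last`), is added,
--     # and the closure is re-saturated to a fixpoint by repeated full-matrix
--     # rounds.  Already-reached vertices change nothing and are skipped.
--     n = len(G)
--     reach = [False] * n
--     last = 0
--     for ver in range(n):
--         if not reach[ver]:
--             last = ver
--             reach[ver] = True
--             changed = True
--             while changed:
--                 changed = False
--                 for u in range(n):
--                     if reach[u]:
--                         for v in range(n):
--                             if G[u][v] and not reach[v]:
--                                 reach[v] = True
--                                 changed = True
--     return last
-- ===== Notes on version B (the rewrite author's own statement) =====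
-- stated objective: alternative
-- what changed: Replaced the recursive DFS entirely by an incremental reachability closure: B keeps a boolean 'reach' array of vertices reachable from the processed prefix; a vertex not yet in the closure becomes 'last', is added, and the closure is re-saturated to a fixpoint by repeated full-matrix rounds; no DFS, no recursion, no stack.
import Mathlib
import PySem

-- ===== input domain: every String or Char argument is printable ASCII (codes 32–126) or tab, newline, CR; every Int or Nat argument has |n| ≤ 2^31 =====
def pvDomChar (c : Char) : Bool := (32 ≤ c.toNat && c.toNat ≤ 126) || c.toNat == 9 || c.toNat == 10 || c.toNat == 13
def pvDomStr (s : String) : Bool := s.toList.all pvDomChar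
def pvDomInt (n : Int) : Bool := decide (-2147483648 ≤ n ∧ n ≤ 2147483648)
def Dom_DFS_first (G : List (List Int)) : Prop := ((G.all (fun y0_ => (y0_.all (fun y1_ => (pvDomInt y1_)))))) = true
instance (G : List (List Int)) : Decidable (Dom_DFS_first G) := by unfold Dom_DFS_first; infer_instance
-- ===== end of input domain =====

-- B replaces the DFS entirely by a round-based reachability closure (saturate a
-- boolean reach array to a fixpoint after adding each vertex); same return value.

-- ===== PORT A =====
-- recursive DFS_visit; `fuel` is a totality guard only: each recursive call is made on a
-- vertex that is immediately marked, so fuel = n (supplied at each call site) never runs out.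
-- G[u][v] is ported as (G.getD u []).getD v 0: exact under Pre_DFS_first (all indices in range).
def dfsVisit (G : List (List Int)) (n : Nat) : Nat → List Bool → Nat → List Bool
  | 0, visited, _ => visited
  | fuel+1, visited, u =>
    (List.range n).foldl
      (fun vis v =>
        if (G.getD u []).getD v 0 ≠ 0 ∧ vis.getD v false = false
        then dfsVisit G n fuel vis v else vis)
      (visited.set u true)

def DFS_first (G : List (List Int)) : Int :=
  Int.ofNat ((List.range G.length).foldl
    (fun (s : List Bool × Nat) ver =>
      if s.1.getD ver false = false then (dfsVisit G G.length G.length s.1 ver, ver) else s)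
    (List.replicate G.length false, 0)).2

-- ===== PORT B =====
-- one pass of `for u: if reach[u]: for v: if G[u][v] and not reach[v]: reach[v]=True; changed=True`
def innerStep (G : List (List Int)) (u : Nat) (t : List Bool × Bool) (v : Nat) : List Bool × Bool :=
  if (G.getD u []).getD v 0 ≠ 0 ∧ t.1.getD v false = false then (t.1.set v true, true) else t

def outerStep (G : List (List Int)) (n : Nat) (s : List Bool × Bool) (u : Nat) : List Bool × Bool :=
  if s.1.getD u false = true then (List.range n).foldl (innerStep G u) s else s

-- one `while changed` round: returns the new reach array and the `changed` flag
def closeRound (G : List (List Int)) (n : Nat) (r : List Bool) : List Bool × Bool :=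
  (List.range n).foldl (outerStep G n) (r, false)

-- the `while changed` loop; `fuel` is a totality guard only: each round that reports
-- `changed` strictly decreases the number of False entries (≤ n), so fuel = n+1 never runs out.
def closeLoop (G : List (List Int)) (n : Nat) : Nat → List Bool → List Bool
  | 0, r => r
  | fuel+1, r =>
    if (closeRound G n r).2 then closeLoop G n fuel (closeRound G n r).1 else (closeRound G n r).1

def DFS_first_alt (G : List (List Int)) : Int :=
  Int.ofNat ((List.range G.length).foldl
    (fun (s : List Bool × Nat) ver =>
      if s.1.getD ver false = false
      then (closeLoop G G.length (G.length + 1) (s.1.set ver true), ver) else s)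
    (List.replicate G.length false, 0)).2

-- ===== PRECONDITION & SPEC =====
-- Pre_ excludes exactly the inputs where the Python A raises IndexError: the outer loop makes
-- every vertex's full row G[u][0..n-1] get scanned, so A raises iff some row is shorter than n
-- (B raises there too). No input on which A returns is excluded.
def Pre_DFS_first (G : List (List Int)) : Prop := ∀ row ∈ G, G.length ≤ row.length
instance (G : List (List Int)) : Decidable (Pre_DFS_first G) := by unfold Pre_DFS_first; infer_instance
def pvWitness_DFS_first : List (List Int) := [[0, 1], [1, 0]]

def Spec_DFS_first (G : List (List Int)) (out : Int) : Prop := out = DFS_first_alt G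
instance (G : List (List Int)) (out : Int) : Decidable (Spec_DFS_first G out) := by unfold Spec_DFS_first; infer_instance

-- ===== CLAIM (what is proved, stated in full; the proofs are below) =====
def Claim_equal_DFS_first : Prop := ∀ (G : List (List Int)), Dom_DFS_first G → Pre_DFS_first G → Spec_DFS_first G (DFS_first G)

-- ===== LEMMAS AND PROOFS =====

-- pointwise order on visited arrays
def vLe (a b : List Bool) : Prop := ∀ w, a.getD w false = true → b.getD w false = true

-- number of unvisited entries
def cF : List Bool → Nat
  | [] => 0
  | b :: t => (if b then 0 else 1) + cF t

-- vertices reachable from u by edges whose endpoints are unvisited in vis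
inductive Reach (G : List (List Int)) (n : Nat) (vis : List Bool) (u : Nat) : Nat → Prop
  | refl : vis.getD u false = false → Reach G n vis u u
  | step {w v : Nat} : Reach G n vis u w → v < n → (G.getD w []).getD v 0 ≠ 0 →
      vis.getD v false = false → Reach G n vis u v

def Closed (G : List (List Int)) (n : Nat) (vis0 T : List Bool) : Prop :=
  ∀ w v, vis0.getD w false = false → T.getD w false = true → v < n →
    (G.getD w []).getD v 0 ≠ 0 → T.getD v false = true

-- absolute closure under out-edges (B-side invariant)
def AClosedN (G : List (List Int)) (n : Nat) (r : List Bool) : Prop :=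
  ∀ w v, r.getD w false = true → v < n → (G.getD w []).getD v 0 ≠ 0 → r.getD v false = true

-- "every marked vertex is either old or reachable from ver"
def SoundTo (G : List (List Int)) (n : Nat) (vis0 : List Bool) (ver : Nat) (r : List Bool) : Prop :=
  ∀ w, r.getD w false = true → vis0.getD w false = true ∨ Reach G n vis0 ver w

lemma vLe_refl (a : List Bool) : vLe a a := fun _ h => h
lemma vLe_trans {a b c : List Bool} (h1 : vLe a b) (h2 : vLe b c) : vLe a c := fun w h => h2 w (h1 w h)

lemma getD_set_self (l : List Bool) (u : Nat) (h : u < l.length) :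
    (l.set u true).getD u false = true := by
  simp [List.getD, h]
lemma getD_set_ne (l : List Bool) (u w : Nat) (h : u ≠ w) :
    (l.set u true).getD w false = l.getD w false := by
  simp [List.getD, List.getElem?_set_ne h]
lemma vLe_set (l : List Bool) (u : Nat) : vLe l (l.set u true) := by
  intro w hw
  by_cases huw : u = w
  · subst huw
    by_cases hu : u < l.length
    · exact getD_set_self l u hu
    · rwa [List.set_eq_of_length_le (Nat.le_of_not_lt hu)]
  · rwa [getD_set_ne l u w huw]
lemma not_vget_of_vLe {a b : List Bool} (h : vLe a b) {w : Nat} (hb : b.getD w false = false) :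
    a.getD w false = false := by
  cases hw : a.getD w false with
  | false => rfl
  | true => rw [h w hw] at hb; cases hb

lemma getD_true_lt (l : List Bool) (u : Nat) (h : l.getD u false = true) : u < l.length := by
  by_contra hc
  rw [List.getD_eq_getElem?_getD, List.getElem?_eq_none (Nat.le_of_not_lt hc)] at h
  cases h

lemma cF_le_len (l : List Bool) : cF l ≤ l.length := by
  induction l with
  | nil => simp [cF]
  | cons b t ih => cases b <;> simp [cF] <;> omega
lemma cF_set_true : ∀ (l : List Bool) (u : Nat), l.getD u false = false → u < l.length →
    cF (l.set u true) + 1 = cF l := by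
  intro l
  induction l with
  | nil => intro _ _ h; simp at h
  | cons b t ih =>
    intro u hget hlen
    cases u with
    | zero =>
      simp [List.getD] at hget
      simp [cF, hget]
      omega
    | succ u =>
      have h1 : t.getD u false = false := by simpa [List.getD] using hget
      have h2 : u < t.length := by simpa using hlen
      have := ih u h1 h2
      simp [cF]
      omega
lemma cF_pos (l : List Bool) (u : Nat) (h : l.getD u false = false) (hu : u < l.length) :
    1 ≤ cF l := by
  have := cF_set_true l u h hu
  omega
lemma cF_anti : ∀ (a b : List Bool), a.length = b.length → vLe a b → cF b ≤ cF a := by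
  intro a
  induction a with
  | nil => intro b hl _; cases b <;> simp_all [cF]
  | cons x t ih =>
    intro b hl hle
    cases b with
    | nil => simp at hl
    | cons y u =>
      have htail : cF u ≤ cF t := by
        refine ih u (by simpa using hl) ?_
        intro w hw
        have := hle (w+1) (by simpa [List.getD] using hw)
        simpa [List.getD] using this
      have hhead : (if y then 0 else 1) ≤ (if x then 0 else 1) := by
        cases x with
        | true =>
          have := hle 0 (by simp [List.getD])
          simp [List.getD] at this
          simp [this]
        | false => cases y <;> simp
      simp [cF]; omega

lemma eq_of_getD : ∀ (a b : List Bool), a.length = b.length →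
    (∀ w, a.getD w false = b.getD w false) → a = b := by
  intro a
  induction a with
  | nil => intro b hl _; cases b <;> simp_all
  | cons x t ih =>
    intro b hl h
    cases b with
    | nil => simp at hl
    | cons y u =>
      have h0 := h 0
      simp [List.getD] at h0
      have : t = u := ih u (by simpa using hl) (fun w => by simpa [List.getD] using h (w+1))
      rw [h0, this]

lemma foldl_rec {β : Type} (P : β → Prop) (f : β → Nat → β) :
    ∀ (l : List Nat) (s : β), (∀ s v, v ∈ l → P s → P (f s v)) → P s → P (List.foldl f s l) := by
  intro l
  induction l with
  | nil => intro s _ hs; simpa using hs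
  | cons a t ih =>
    intro s h hs
    simp only [List.foldl_cons]
    exact ih (f s a) (fun s v hv => h s v (List.mem_cons_of_mem a hv)) (h s a (List.mem_cons_self) hs)

lemma Reach_not_vis {G : List (List Int)} {n : Nat} {vis : List Bool} {u w : Nat}
    (h : Reach G n vis u w) : vis.getD w false = false := by
  induction h with
  | refl h => exact h
  | step _ _ _ h _ => exact h

-- ---- dfsVisit (port A) ----
lemma dfsVisit_length (G : List (List Int)) (n : Nat) :
    ∀ fuel vis u, (dfsVisit G n fuel vis u).length = vis.length := by
  intro fuel
  induction fuel with
  | zero => intro vis u; rfl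
  | succ f ih =>
    intro vis u
    rw [dfsVisit]
    have : ∀ s : List Bool, s.length = vis.length →
        (List.foldl (fun vis' v =>
          if (G.getD u []).getD v 0 ≠ 0 ∧ vis'.getD v false = false
          then dfsVisit G n f vis' v else vis') s (List.range n)).length = vis.length := by
      intro s hs
      refine foldl_rec (fun s => s.length = vis.length) _ (List.range n) s ?_ hs
      intro s v _ hP
      by_cases hc : (G.getD u []).getD v 0 ≠ 0 ∧ s.getD v false = false
      · rw [if_pos hc, ih]; exact hP
      · rwa [if_neg hc]
    exact this _ (by simp)

lemma dfsVisit_mono (G : List (List Int)) (n : Nat) :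
    ∀ fuel vis u, vLe vis (dfsVisit G n fuel vis u) := by
  intro fuel
  induction fuel with
  | zero => intro vis u; exact vLe_refl vis
  | succ f ih =>
    intro vis u
    rw [dfsVisit]
    have base : vLe vis (vis.set u true) := vLe_set vis u
    refine vLe_trans base ?_
    refine foldl_rec (fun s => vLe (vis.set u true) s) _ (List.range n) _ ?_ (vLe_refl _)
    intro s v _ hP
    by_cases hc : (G.getD u []).getD v 0 ≠ 0 ∧ s.getD v false = false
    · rw [if_pos hc]; exact vLe_trans hP (ih s v)
    · rwa [if_neg hc]

lemma dfsVisit_sound (G : List (List Int)) (n : Nat) (vis0 : List Bool) (u0 : Nat) :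
    ∀ fuel vis u, vLe vis0 vis →
      (∀ w, vis.getD w false = true → vis0.getD w false = true ∨ Reach G n vis0 u0 w) →
      Reach G n vis0 u0 u →
      ∀ w, (dfsVisit G n fuel vis u).getD w false = true →
        vis0.getD w false = true ∨ Reach G n vis0 u0 w := by
  intro fuel
  induction fuel with
  | zero => intro vis u _ hsound _ w hw; exact hsound w hw
  | succ f ih =>
    intro vis u hle hsound hru w
    rw [dfsVisit]
    have hP : vLe vis0 (vis.set u true) ∧
        (∀ w, (vis.set u true).getD w false = true →
          vis0.getD w false = true ∨ Reach G n vis0 u0 w) := by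
      refine ⟨vLe_trans hle (vLe_set vis u), ?_⟩
      intro w hw
      by_cases huw : u = w
      · exact Or.inr (huw ▸ hru)
      · rw [getD_set_ne vis u w huw] at hw
        exact hsound w hw
    have : ∀ s : List Bool,
        (vLe vis0 s ∧ (∀ w, s.getD w false = true → vis0.getD w false = true ∨ Reach G n vis0 u0 w)) →
        (vLe vis0 (List.foldl (fun vis' v =>
          if (G.getD u []).getD v 0 ≠ 0 ∧ vis'.getD v false = false
          then dfsVisit G n f vis' v else vis') s (List.range n)) ∧
        (∀ w, (List.foldl (fun vis' v =>
          if (G.getD u []).getD v 0 ≠ 0 ∧ vis'.getD v false = false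
          then dfsVisit G n f vis' v else vis') s (List.range n)).getD w false = true →
          vis0.getD w false = true ∨ Reach G n vis0 u0 w)) := by
      intro s hs
      refine foldl_rec (fun s => vLe vis0 s ∧
        (∀ w, s.getD w false = true → vis0.getD w false = true ∨ Reach G n vis0 u0 w)) _
        (List.range n) s ?_ hs
      intro s v hv ⟨hsle, hss⟩
      by_cases hc : (G.getD u []).getD v 0 ≠ 0 ∧ s.getD v false = false
      · rw [if_pos hc]
        have hv0 : vis0.getD v false = false := not_vget_of_vLe hsle hc.2
        have hrv : Reach G n vis0 u0 v := by
          have hru' : Reach G n vis0 u0 u := hru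
          exact Reach.step hru' (List.mem_range.mp hv) hc.1 hv0
        exact ⟨vLe_trans hsle (dfsVisit_mono G n f s v), ih s v hsle hss hrv⟩
      · rw [if_neg hc]; exact ⟨hsle, hss⟩
    intro hw
    exact (this _ hP).2 w hw

lemma dfsVisit_closed (G : List (List Int)) (n : Nat) :
    ∀ fuel vis u, vis.length = n → u < n → vis.getD u false = false → cF vis ≤ fuel →
      Closed G n vis (dfsVisit G n fuel vis u) ∧ (dfsVisit G n fuel vis u).getD u false = true := by
  intro fuel
  induction fuel with
  | zero =>
    intro vis u hlen hu hvu hf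
    have := cF_pos vis u hvu (hlen ▸ hu)
    omega
  | succ f ih =>
    intro vis u hlen hu hvu hf
    rw [dfsVisit]
    have hulen : u < vis.length := hlen ▸ hu
    have hcs0 : cF (vis.set u true) + 1 = cF vis := cF_set_true vis u hvu hulen
    have aux : ∀ l : List Nat, (∀ v ∈ l, v < n) → ∀ s : List Bool,
        s.length = n → vLe (vis.set u true) s →
        (∀ w v, w ≠ u → vis.getD w false = false → s.getD w false = true → v < n →
          (G.getD w []).getD v 0 ≠ 0 → s.getD v false = true) →
        ((List.foldl (fun vis' v =>
            if (G.getD u []).getD v 0 ≠ 0 ∧ vis'.getD v false = false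
            then dfsVisit G n f vis' v else vis') s l).length = n ∧
         vLe s (List.foldl (fun vis' v =>
            if (G.getD u []).getD v 0 ≠ 0 ∧ vis'.getD v false = false
            then dfsVisit G n f vis' v else vis') s l) ∧
         vLe (vis.set u true) (List.foldl (fun vis' v =>
            if (G.getD u []).getD v 0 ≠ 0 ∧ vis'.getD v false = false
            then dfsVisit G n f vis' v else vis') s l) ∧
         (∀ w v, w ≠ u → vis.getD w false = false →
            (List.foldl (fun vis' v =>
              if (G.getD u []).getD v 0 ≠ 0 ∧ vis'.getD v false = false
              then dfsVisit G n f vis' v else vis') s l).getD w false = true → v < n →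
            (G.getD w []).getD v 0 ≠ 0 →
            (List.foldl (fun vis' v =>
              if (G.getD u []).getD v 0 ≠ 0 ∧ vis'.getD v false = false
              then dfsVisit G n f vis' v else vis') s l).getD v false = true) ∧
         (∀ v ∈ l, (G.getD u []).getD v 0 ≠ 0 →
            (List.foldl (fun vis' v =>
              if (G.getD u []).getD v 0 ≠ 0 ∧ vis'.getD v false = false
              then dfsVisit G n f vis' v else vis') s l).getD v false = true)) := by
      intro l
      induction l with
      | nil =>
        intro _ s hslen hsle hscl
        exact ⟨hslen, vLe_refl s, hsle, fun w v hw h1 h2 h3 h4 => hscl w v hw h1 h2 h3 h4,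
          fun v hv => absurd hv (List.not_mem_nil)⟩
      | cons a t iht =>
        intro hmem s hslen hsle hscl
        simp only [List.foldl_cons]
        by_cases hc : (G.getD u []).getD a 0 ≠ 0 ∧ s.getD a false = false
        · rw [if_pos hc]
          have ha : a < n := hmem a (List.mem_cons_self)
          have hcfs : cF s ≤ f := by
            have h1 : cF s ≤ cF (vis.set u true) := by
              refine cF_anti (vis.set u true) s ?_ hsle
              simp [hslen, hlen]
            omega
          have hihc := ih s a hslen ha hc.2 hcfs
          have hmono := dfsVisit_mono G n f s a
          have hlen' : (dfsVisit G n f s a).length = n := by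
            rw [dfsVisit_length]; exact hslen
          have hcl' : ∀ w v, w ≠ u → vis.getD w false = false →
              (dfsVisit G n f s a).getD w false = true → v < n →
              (G.getD w []).getD v 0 ≠ 0 → (dfsVisit G n f s a).getD v false = true := by
            intro w v hw hvw hwt hv he
            cases hsw : s.getD w false with
            | true => exact hmono v (hscl w v hw hvw hsw hv he)
            | false => exact hihc.1 w v hsw hwt hv he
          have hrest := iht (fun v hv => hmem v (List.mem_cons_of_mem a hv))
            (dfsVisit G n f s a) hlen' (vLe_trans hsle hmono) hcl'
          refine ⟨hrest.1, vLe_trans hmono hrest.2.1, hrest.2.2.1, hrest.2.2.2.1, ?_⟩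
          intro v hv he
          rcases List.mem_cons.mp hv with h | h
          · subst h; exact hrest.2.1 v hihc.2
          · exact hrest.2.2.2.2 v h he
        · rw [if_neg hc]
          have hrest := iht (fun v hv => hmem v (List.mem_cons_of_mem a hv)) s hslen hsle hscl
          refine ⟨hrest.1, hrest.2.1, hrest.2.2.1, hrest.2.2.2.1, ?_⟩
          intro v hv he
          rcases List.mem_cons.mp hv with h | h
          · subst h
            rcases Classical.em (s.getD v false = false) with hvf | hvf
            · exact absurd ⟨he, hvf⟩ hc
            · have : s.getD v false = true := by
                cases hx : s.getD v false with
                | true => rfl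
                | false => exact absurd hx hvf
              exact hrest.2.1 v this
          · exact hrest.2.2.2.2 v h he
    have hres := aux (List.range n) (fun v hv => List.mem_range.mp hv) (vis.set u true)
      (by simp [hlen]) (vLe_refl _)
      (by
        intro w v hw hvw hsw _ _
        rw [getD_set_ne vis u w (fun h => hw h.symm)] at hsw
        rw [hvw] at hsw
        cases hsw)
    refine ⟨?_, hres.2.2.1 u (getD_set_self vis u hulen)⟩
    intro w v hvw hwt hv he
    by_cases hwu : w = u
    · subst hwu
      exact hres.2.2.2.2 v (List.mem_range.mpr hv) he
    · exact hres.2.2.2.1 w v hwu hvw hwt hv he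

lemma dfsVisit_char (G : List (List Int)) (n : Nat) (vis : List Bool) (u : Nat)
    (hlen : vis.length = n) (hu : u < n) (hvu : vis.getD u false = false) (fuel : Nat)
    (hf : cF vis ≤ fuel) :
    ∀ w, (dfsVisit G n fuel vis u).getD w false = true ↔
      (vis.getD w false = true ∨ Reach G n vis u w) := by
  intro w
  constructor
  · exact fun hw => dfsVisit_sound G n vis u fuel vis u (vLe_refl vis)
      (fun w hw => Or.inl hw) (Reach.refl hvu) w hw
  · rintro (hw | hw)
    · exact dfsVisit_mono G n fuel vis u w hw
    · have hcl := dfsVisit_closed G n fuel vis u hlen hu hvu hf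
      induction hw with
      | refl _ => exact hcl.2
      | step hr hv he hnv ihr =>
        exact hcl.1 _ _ (Reach_not_vis hr) ihr hv he

-- ---- closeRound / closeLoop (port B) ----

lemma innerStep_flag (G : List (List Int)) (u : Nat) (t : List Bool × Bool) (v : Nat)
    (h : t.2 = true) : (innerStep G u t v).2 = true := by
  unfold innerStep
  split_ifs with hc
  · rfl
  · exact h

lemma inner_flag_stays (G : List (List Int)) (u : Nat) :
    ∀ (l : List Nat) (t : List Bool × Bool), t.2 = true →
      (List.foldl (innerStep G u) t l).2 = true := by
  intro l t h
  exact foldl_rec (fun t => t.2 = true) _ l t (fun t v _ ht => innerStep_flag G u t v ht) h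

lemma outer_flag_stays (G : List (List Int)) (n : Nat) :
    ∀ (l : List Nat) (s : List Bool × Bool), s.2 = true →
      (List.foldl (outerStep G n) s l).2 = true := by
  intro l s h
  refine foldl_rec (fun s => s.2 = true) _ l s ?_ h
  intro s u _ hs
  unfold outerStep
  split_ifs with hg
  · exact inner_flag_stays G u (List.range n) s hs
  · exact hs

-- if an inner pass starting from (r,false) reports no change, it really did nothing
lemma inner_false (G : List (List Int)) (u : Nat) :
    ∀ (l : List Nat) (r : List Bool),
      (List.foldl (innerStep G u) (r, false) l).2 = false →
      List.foldl (innerStep G u) (r, false) l = (r, false) ∧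
      ∀ v ∈ l, ¬((G.getD u []).getD v 0 ≠ 0 ∧ r.getD v false = false) := by
  intro l
  induction l with
  | nil => intro r _; exact ⟨rfl, fun v hv => absurd hv (List.not_mem_nil)⟩
  | cons a t ih =>
    intro r hflag
    simp only [List.foldl_cons] at hflag ⊢
    by_cases hc : (G.getD u []).getD a 0 ≠ 0 ∧ r.getD a false = false
    · exfalso
      have : innerStep G u (r, false) a = (r.set a true, true) := by
        unfold innerStep; rw [if_pos hc]
      rw [this] at hflag
      rw [inner_flag_stays G u t (r.set a true, true) rfl] at hflag
      cases hflag
    · have hstep : innerStep G u (r, false) a = (r, false) := by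
        unfold innerStep; rw [if_neg hc]
      rw [hstep] at hflag ⊢
      have := ih r hflag
      refine ⟨this.1, ?_⟩
      intro v hv
      rcases List.mem_cons.mp hv with h | h
      · subst h; exact hc
      · exact this.2 v h

-- if a whole round from (r,false) reports no change, r is closed along all scanned pairs
lemma outer_false (G : List (List Int)) (n : Nat) :
    ∀ (l : List Nat) (r : List Bool),
      (List.foldl (outerStep G n) (r, false) l).2 = false →
      ∀ u ∈ l, r.getD u false = true →
        ∀ v, v < n → ¬((G.getD u []).getD v 0 ≠ 0 ∧ r.getD v false = false) := by
  intro l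
  induction l with
  | nil => intro r _ u hu; exact absurd hu (List.not_mem_nil)
  | cons a t ih =>
    intro r hflag
    simp only [List.foldl_cons] at hflag
    by_cases hg : r.getD a false = true
    · have hstep : outerStep G n (r, false) a = List.foldl (innerStep G a) (r, false) (List.range n) := by
        unfold outerStep; rw [if_pos hg]
      rw [hstep] at hflag
      have hq : (List.foldl (innerStep G a) (r, false) (List.range n)).2 = false := by
        by_contra hcq
        have : (List.foldl (innerStep G a) (r, false) (List.range n)).2 = true := by
          cases hx : (List.foldl (innerStep G a) (r, false) (List.range n)).2 with
          | true => rfl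
          | false => exact absurd hx hcq
        rw [outer_flag_stays G n t _ this] at hflag
        cases hflag
      have hinner := inner_false G a (List.range n) r hq
      rw [hinner.1] at hflag
      intro u hu hru v hv
      rcases List.mem_cons.mp hu with h | h
      · subst h; exact hinner.2 v (List.mem_range.mpr hv)
      · exact ih r hflag u h hru v hv
    · have hstep : outerStep G n (r, false) a = (r, false) := by
        unfold outerStep; rw [if_neg hg]
      rw [hstep] at hflag
      intro u hu hru v hv
      rcases List.mem_cons.mp hu with h | h
      · subst h; exact absurd hru hg
      · exact ih r hflag u h hru v hv

-- basic invariants of one round: length, monotone, no-change ⇒ identity, change ⇒ fewer Falses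
lemma closeRound_inv (G : List (List Int)) (n : Nat) (vis0 : List Bool) (ver : Nat)
    (hcl : AClosedN G n vis0) (r : List Bool) (hlen : r.length = n)
    (hsound : SoundTo G n vis0 ver r) :
    (closeRound G n r).1.length = n ∧ vLe r (closeRound G n r).1 ∧
    SoundTo G n vis0 ver (closeRound G n r).1 ∧
    ((closeRound G n r).2 = false → (closeRound G n r).1 = r) ∧
    ((closeRound G n r).2 = true → cF (closeRound G n r).1 < cF r) := by
  unfold closeRound
  have main : ∀ (s : List Bool × Bool),
      (s.1.length = n ∧ vLe r s.1 ∧ SoundTo G n vis0 ver s.1 ∧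
       (s.2 = false → s.1 = r) ∧ (s.2 = true → cF s.1 < cF r)) →
      ((List.foldl (outerStep G n) s (List.range n)).1.length = n ∧
       vLe r (List.foldl (outerStep G n) s (List.range n)).1 ∧
       SoundTo G n vis0 ver (List.foldl (outerStep G n) s (List.range n)).1 ∧
       ((List.foldl (outerStep G n) s (List.range n)).2 = false →
         (List.foldl (outerStep G n) s (List.range n)).1 = r) ∧
       ((List.foldl (outerStep G n) s (List.range n)).2 = true →
         cF (List.foldl (outerStep G n) s (List.range n)).1 < cF r)) := by
    intro s hs
    refine foldl_rec (fun s => s.1.length = n ∧ vLe r s.1 ∧ SoundTo G n vis0 ver s.1 ∧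
      (s.2 = false → s.1 = r) ∧ (s.2 = true → cF s.1 < cF r)) _ (List.range n) s ?_ hs
    intro s u _ ⟨hl, hm, hsnd, hff, hft⟩
    unfold outerStep
    split_ifs with hg
    · -- inner pass over v, with the extra invariant vLe s.1 t.1 (so t.1[u] stays true)
      have inner : ∀ (t : List Bool × Bool),
          (t.1.length = n ∧ vLe r t.1 ∧ SoundTo G n vis0 ver t.1 ∧
           (t.2 = false → t.1 = r) ∧ (t.2 = true → cF t.1 < cF r) ∧ vLe s.1 t.1) →
          ((List.foldl (innerStep G u) t (List.range n)).1.length = n ∧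
           vLe r (List.foldl (innerStep G u) t (List.range n)).1 ∧
           SoundTo G n vis0 ver (List.foldl (innerStep G u) t (List.range n)).1 ∧
           ((List.foldl (innerStep G u) t (List.range n)).2 = false →
             (List.foldl (innerStep G u) t (List.range n)).1 = r) ∧
           ((List.foldl (innerStep G u) t (List.range n)).2 = true →
             cF (List.foldl (innerStep G u) t (List.range n)).1 < cF r) ∧
           vLe s.1 (List.foldl (innerStep G u) t (List.range n)).1) := by
        intro t ht
        refine foldl_rec (fun t => t.1.length = n ∧ vLe r t.1 ∧ SoundTo G n vis0 ver t.1 ∧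
          (t.2 = false → t.1 = r) ∧ (t.2 = true → cF t.1 < cF r) ∧ vLe s.1 t.1)
          _ (List.range n) t ?_ ht
        intro t v hv ⟨htl, htm, htsnd, htff, htft, hts⟩
        unfold innerStep
        split_ifs with hc
        · have hvn : v < n := List.mem_range.mp hv
          have hvlen : v < t.1.length := htl ▸ hvn
          have hcf : cF (t.1.set v true) + 1 = cF t.1 := cF_set_true t.1 v hc.2 hvlen
          have hcfr : cF t.1 ≤ cF r := cF_anti r t.1 (by rw [hl] at *; omega) htm
          have hu_t : t.1.getD u false = true := hts u hg
          have husnd : vis0.getD u false = true ∨ Reach G n vis0 ver u := htsnd u hu_t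
          refine ⟨by simp [htl], vLe_trans htm (vLe_set t.1 v), ?_, ?_, ?_, vLe_trans hts (vLe_set t.1 v)⟩
          · intro w hw
            by_cases hvw : v = w
            · subst hvw
              rcases husnd with hvu | hru
              · exact Or.inl (hcl u v hvu hvn hc.1)
              · cases hvis0v : vis0.getD v false with
                | true => exact Or.inl rfl
                | false => exact Or.inr (Reach.step hru hvn hc.1 hvis0v)
            · rw [getD_set_ne t.1 v w hvw] at hw
              exact htsnd w hw
          · intro h; cases h
          · intro _
            show cF (t.1.set v true) < cF r
            omega
        · exact ⟨htl, htm, htsnd, htff, htft, hts⟩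
      have := inner s ⟨hl, hm, hsnd, hff, hft, vLe_refl s.1⟩
      exact ⟨this.1, this.2.1, this.2.2.1, this.2.2.2.1, this.2.2.2.2.1⟩
    · exact ⟨hl, hm, hsnd, hff, hft⟩
  exact main (r, false) ⟨hlen, vLe_refl r, hsound, fun _ => rfl, fun h => by cases h⟩

-- SoundTo is instantiable trivially (used where only length/monotonicity matter)
lemma soundTo_trivial (G : List (List Int)) (n : Nat) (r : List Bool) (hlen : r.length = n) :
    SoundTo G n (List.replicate n true) 0 r := by
  intro w hw
  have : w < n := hlen ▸ getD_true_lt r w hw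
  exact Or.inl (by simp [List.getD, this])

lemma aclosed_replicate_true (G : List (List Int)) (n : Nat) :
    AClosedN G n (List.replicate n true) := by
  intro w v _ hv _
  simp [List.getD, hv]

lemma closeRound_basic (G : List (List Int)) (n : Nat) (r : List Bool) (hlen : r.length = n) :
    (closeRound G n r).1.length = n ∧ vLe r (closeRound G n r).1 ∧
    ((closeRound G n r).2 = false → (closeRound G n r).1 = r) ∧
    ((closeRound G n r).2 = true → cF (closeRound G n r).1 < cF r) := by
  have := closeRound_inv G n (List.replicate n true) 0 (aclosed_replicate_true G n) r hlen
    (soundTo_trivial G n r hlen)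
  exact ⟨this.1, this.2.1, this.2.2.2.1, this.2.2.2.2⟩

lemma closeLoop_length (G : List (List Int)) (n : Nat) :
    ∀ fuel (r : List Bool), r.length = n → (closeLoop G n fuel r).length = n := by
  intro fuel
  induction fuel with
  | zero => intro r h; exact h
  | succ f ih =>
    intro r h
    rw [closeLoop]
    have hb := closeRound_basic G n r h
    split_ifs with hc
    · exact ih _ hb.1
    · exact hb.1

lemma closeLoop_mono (G : List (List Int)) (n : Nat) :
    ∀ fuel (r : List Bool), r.length = n → vLe r (closeLoop G n fuel r) := by
  intro fuel
  induction fuel with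
  | zero => intro r _; exact vLe_refl r
  | succ f ih =>
    intro r h
    rw [closeLoop]
    have hb := closeRound_basic G n r h
    split_ifs with hc
    · exact vLe_trans hb.2.1 (ih _ hb.1)
    · exact hb.2.1

lemma closeLoop_sound (G : List (List Int)) (n : Nat) (vis0 : List Bool) (ver : Nat)
    (hcl : AClosedN G n vis0) :
    ∀ fuel (r : List Bool), r.length = n → SoundTo G n vis0 ver r →
      SoundTo G n vis0 ver (closeLoop G n fuel r) := by
  intro fuel
  induction fuel with
  | zero => intro r _ hs; exact hs
  | succ f ih =>
    intro r h hs
    rw [closeLoop]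
    have hi := closeRound_inv G n vis0 ver hcl r h hs
    split_ifs with hc
    · exact ih _ hi.1 hi.2.2.1
    · exact hi.2.2.1

lemma closeLoop_closed (G : List (List Int)) (n : Nat) :
    ∀ fuel (r : List Bool), r.length = n → cF r < fuel →
      AClosedN G n (closeLoop G n fuel r) := by
  intro fuel
  induction fuel with
  | zero => intro r _ h; omega
  | succ f ih =>
    intro r h hf
    rw [closeLoop]
    have hb := closeRound_basic G n r h
    split_ifs with hc
    · exact ih _ hb.1 (by have := hb.2.2.2 hc; omega)
    · have hfix : (closeRound G n r).1 = r := hb.2.2.1 (by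
        cases hx : (closeRound G n r).2 with
        | false => rfl
        | true => exact absurd hx hc)
      rw [hfix]
      intro w v hw hv he
      have hwn : w < n := h ▸ getD_true_lt r w hw
      have := outer_false G n (List.range n) r (by
        have : List.foldl (outerStep G n) (r, false) (List.range n) = closeRound G n r := rfl
        rw [this]
        cases hx : (closeRound G n r).2 with
        | false => rfl
        | true => exact absurd hx hc) w (List.mem_range.mpr hwn) hw v hv
      cases hx : r.getD v false with
      | true => rfl
      | false => exact absurd ⟨he, hx⟩ this

lemma reach_in_closed (G : List (List Int)) (n : Nat) (vis0 R : List Bool) (ver : Nat)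
    (hRcl : AClosedN G n R) (hin : R.getD ver false = true) :
    ∀ w, Reach G n vis0 ver w → R.getD w false = true := by
  intro w hw
  induction hw with
  | refl _ => exact hin
  | step _ hv he _ ih => exact hRcl _ _ ih hv he

-- the B update on an unvisited root equals vis ∪ Reach(vis, ver)
lemma closeLoop_char (G : List (List Int)) (n : Nat) (vis : List Bool) (ver : Nat)
    (hcl : AClosedN G n vis) (hlen : vis.length = n) (hver : ver < n)
    (hvv : vis.getD ver false = false) :
    ∀ w, (closeLoop G n (n + 1) (vis.set ver true)).getD w false = true ↔
      (vis.getD w false = true ∨ Reach G n vis ver w) := by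
  have hslen : (vis.set ver true).length = n := by simp [hlen]
  have hsnd : SoundTo G n vis ver (vis.set ver true) := by
    intro w hw
    by_cases hvw : ver = w
    · subst hvw; exact Or.inr (Reach.refl hvv)
    · rw [getD_set_ne vis ver w hvw] at hw; exact Or.inl hw
  have hfuel : cF (vis.set ver true) < n + 1 := by
    have := cF_le_len (vis.set ver true)
    omega
  intro w
  constructor
  · exact fun hw => closeLoop_sound G n vis ver hcl (n + 1) _ hslen hsnd w hw
  · rintro (hw | hw)
    · exact closeLoop_mono G n (n + 1) _ hslen w (vLe_set vis ver w hw)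
    · exact reach_in_closed G n vis _ ver (closeLoop_closed G n (n + 1) _ hslen hfuel)
        (closeLoop_mono G n (n + 1) _ hslen ver (getD_set_self vis ver (hlen ▸ hver))) w hw

-- the new visited set is again closed
lemma step_closed (G : List (List Int)) (n : Nat) (vis V' : List Bool) (ver : Nat)
    (hcl : AClosedN G n vis)
    (hchar : ∀ w, V'.getD w false = true ↔ (vis.getD w false = true ∨ Reach G n vis ver w)) :
    AClosedN G n V' := by
  intro w v hw hv he
  rcases (hchar w).mp hw with h | h
  · exact (hchar v).mpr (Or.inl (hcl w v h hv he))
  · cases hx : vis.getD v false with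
    | true => exact (hchar v).mpr (Or.inl hx)
    | false => exact (hchar v).mpr (Or.inr (Reach.step h hv he hx))

-- both updates produce the same list
lemma tree_eq (G : List (List Int)) (n : Nat) (vis : List Bool) (ver : Nat)
    (hcl : AClosedN G n vis) (hlen : vis.length = n) (hver : ver < n)
    (hvv : vis.getD ver false = false) :
    dfsVisit G n n vis ver = closeLoop G n (n + 1) (vis.set ver true) := by
  refine eq_of_getD _ _ ?_ ?_
  · rw [dfsVisit_length, closeLoop_length G n (n + 1) _ (by simp [hlen]), hlen]
  · intro w
    have h1 := dfsVisit_char G n vis ver hlen hver hvv n (hlen ▸ cF_le_len vis) w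
    have h2 := closeLoop_char G n vis ver hcl hlen hver hvv w
    cases hA : (dfsVisit G n n vis ver).getD w false with
    | true => rw [hA] at h1; exact (h2.mpr (h1.mp rfl)).symm
    | false =>
      cases hB : (closeLoop G n (n + 1) (vis.set ver true)).getD w false with
      | true =>
        rw [hB] at h2
        rw [h1.mpr (h2.mp rfl)] at hA
        cases hA
      | false => rfl

lemma outer_eq (G : List (List Int)) :
    ∀ (l : List Nat) (s : List Bool × Nat), (∀ v ∈ l, v < G.length) →
      s.1.length = G.length → AClosedN G G.length s.1 →
      List.foldl (fun (s : List Bool × Nat) ver =>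
          if s.1.getD ver false = false then (dfsVisit G G.length G.length s.1 ver, ver) else s) s l
      = List.foldl (fun (s : List Bool × Nat) ver =>
          if s.1.getD ver false = false
          then (closeLoop G G.length (G.length + 1) (s.1.set ver true), ver) else s) s l := by
  intro l
  induction l with
  | nil => intro s _ _ _; rfl
  | cons a t ih =>
    intro s hmem hslen hscl
    simp only [List.foldl_cons]
    by_cases hc : s.1.getD a false = false
    · rw [if_pos hc, if_pos hc]
      have ha : a < G.length := hmem a (List.mem_cons_self)
      have hteq := tree_eq G G.length s.1 a hscl hslen ha hc
      rw [← hteq]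
      refine ih _ (fun v hv => hmem v (List.mem_cons_of_mem a hv)) ?_ ?_
      · simp only
        rw [dfsVisit_length, hslen]
      · simp only
        refine step_closed G G.length s.1 _ a hscl ?_
        intro w
        rw [hteq]
        exact closeLoop_char G G.length s.1 a hscl hslen ha hc w
    · rw [if_neg hc, if_neg hc]
      exact ih s (fun v hv => hmem v (List.mem_cons_of_mem a hv)) hslen hscl

-- ===== VERDICT (by name: the statement is the Claim_ definition above) =====
theorem DFS_first_spec : Claim_equal_DFS_first := by
  intro G _ _
  unfold Spec_DFS_first DFS_first DFS_first_alt
  rw [outer_eq G (List.range G.length) _ (fun v hv => List.mem_range.mp hv) (by simp)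
    (by intro w v hw; simp [List.getD] at hw)]
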